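-- pv_equiv track=rewrite | github.com/kimko/bmd-micro | project/api/utils/gravity.py | _falling_rock
-- ===== SOURCE A (Python) =====
-- def _falling_rock(segment):
--     """
--     orders the list based on "falling_rocks" rules. Super
--     slow algorithm comparable to bubble sort.
--     """
--     for _ in range(len(segment)):
--         for i in range(len(segment) - 1):
--             if segment[i] == "." and segment[i + 1] == ".":
--                 segment[i], segment[i + 1] = " ", ":"
--             if segment[i] == "." and segment[i + 1] == " ":
--                 segment[i], segment[i + 1] = " ", "."
--             if segment[i] == ":" and segment[i + 1] == " ":
--                 segment[i], segment[i + 1] = " ", ":"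
--             if segment[i] == ":" and segment[i + 1] == ".":
--                 segment[i], segment[i + 1] = ".", ":"
--     return segment
-- ===== SOURCE B (Python) =====
-- def _packed(width, units):
--     cells = [":"] * (units // 2)
--     if units % 2 == 1:
--         cells = ["."] + cells
--     return [" "] * (width - len(cells)) + cells
--
--
-- def _falling_rock(segment):
--     # One pass: count rock units (':'=2, '.'=1) per region between barrier
--     # cells, emit each region packed to the right.  (Does not mutate its
--     # argument, unlike A; equivalence is about the return value.)
--     out = []
--     width = 0
--     units = 0
--     for c in segment:
--         if c == ".":
--             width += 1
--             units += 1
--         elif c == ":":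
--             width += 1
--             units += 2
--         elif c == " ":
--             width += 1
--         else:
--             out += _packed(width, units) + [c]
--             width = 0
--             units = 0
--     return out + _packed(width, units)
-- ===== Notes on version B (the rewrite author's own statement) =====
-- stated objective: faster
-- what changed: Replaces the n-fold bubble-style neighbour-swap passes with a single pass that counts rock units (':'=2, '.'=1) per region between non-cell barriers and emits each region packed to the right in closed form; B does not mutate its argument (equivalence is about the return value).
import Mathlib
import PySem

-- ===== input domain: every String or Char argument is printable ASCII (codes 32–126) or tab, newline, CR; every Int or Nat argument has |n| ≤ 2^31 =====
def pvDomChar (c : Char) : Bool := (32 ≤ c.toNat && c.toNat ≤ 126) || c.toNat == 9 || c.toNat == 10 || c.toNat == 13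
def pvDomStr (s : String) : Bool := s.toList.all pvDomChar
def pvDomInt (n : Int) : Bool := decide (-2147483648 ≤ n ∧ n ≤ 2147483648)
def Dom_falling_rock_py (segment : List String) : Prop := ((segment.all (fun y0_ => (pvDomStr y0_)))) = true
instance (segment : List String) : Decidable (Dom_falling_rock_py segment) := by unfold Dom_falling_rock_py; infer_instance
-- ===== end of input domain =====

-- B replaces A's n bubble-style neighbour-swap passes (O(n^2)) by one pass that counts rock
-- units per barrier-delimited region and emits each region packed right in closed form (O(n));
-- A mutates its argument in place, B does not: the equivalence proved is about the return value.


-- ===== PORT A =====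
-- one iteration of A's inner loop body at index i: the four sequential ifs, each
-- re-reading the (possibly just written) cells, exactly as the Python does
def stepA (l : List String) (i : Nat) : List String :=
  let l := if l.getD i "" = "." ∧ l.getD (i + 1) "" = "." then (l.set i " ").set (i + 1) ":" else l
  let l := if l.getD i "" = "." ∧ l.getD (i + 1) "" = " " then (l.set i " ").set (i + 1) "." else l
  let l := if l.getD i "" = ":" ∧ l.getD (i + 1) "" = " " then (l.set i " ").set (i + 1) ":" else l
  let l := if l.getD i "" = ":" ∧ l.getD (i + 1) "" = "." then (l.set i ".").set (i + 1) ":" else l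
  l

-- inner loop: for i in range(len(segment) - 1)
def innerA (l : List String) : List String :=
  (List.range (l.length - 1)).foldl stepA l

-- outer loop: for _ in range(len(segment))
def falling_rock_py (segment : List String) : List String :=
  (List.range segment.length).foldl (fun l _ => innerA l) segment

-- ===== PORT B =====
def packedCells (width units : Nat) : List String :=
  let cells := List.replicate (units / 2) ":"
  let cells := if units % 2 = 1 then "." :: cells else cells
  List.replicate (width - cells.length) " " ++ cells

def altStep (st : List String × Nat × Nat) (c : String) : List String × Nat × Nat :=
  if c = "." then (st.1, st.2.1 + 1, st.2.2 + 1)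
  else if c = ":" then (st.1, st.2.1 + 1, st.2.2 + 2)
  else if c = " " then (st.1, st.2.1 + 1, st.2.2)
  else (st.1 ++ packedCells st.2.1 st.2.2 ++ [c], 0, 0)

def falling_rock_py_alt (segment : List String) : List String :=
  let st := segment.foldl altStep ([], 0, 0)
  st.1 ++ packedCells st.2.1 st.2.2

-- ===== PRECONDITION & SPEC =====
def Spec_falling_rock_py (segment : List String) (out : List String) : Prop := out = falling_rock_py_alt segment
instance (segment : List String) (out : List String) : Decidable (Spec_falling_rock_py segment out) := by unfold Spec_falling_rock_py; infer_instance

-- ===== CLAIM (what is proved, stated in full; the proofs are below) =====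
def Claim_equal_falling_rock_py : Prop := ∀ (segment : List String), Dom_falling_rock_py segment → Spec_falling_rock_py segment (falling_rock_py segment)

-- ===== LEMMAS AND PROOFS =====

-- proof-side model of one inner sweep: a carry-fold over the list
def step (a b : String) : String × String :=
  if a = "." ∧ b = "." then (" ", ":")
  else if a = "." ∧ b = " " then (" ", ".")
  else if a = ":" ∧ b = " " then (" ", ":")
  else if a = ":" ∧ b = "." then (".", ":")
  else (a, b)

def sweepCarry (a : String) : List String → List String
  | [] => [a]
  | b :: t => (step a b).1 :: sweepCarry (step a b).2 t

def sweep : List String → List String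
  | [] => []
  | a :: t => sweepCarry a t

def units (c : String) : Nat := if c = ":" then 2 else if c = "." then 1 else 0
def unitsL (l : List String) : Nat := (l.map units).sum
def isCell (c : String) : Bool := c = " " || c = "." || c = ":"

-- ---- index-to-carry bridge ----
theorem getD_append_len (pre t : List String) (c d : String) :
    (pre ++ c :: t).getD pre.length d = c := by
  induction pre with
  | nil => rfl
  | cons x xs ih => simp only [List.cons_append, List.getD_cons_succ, List.length_cons]; exact ih

theorem set_append_len (pre t : List String) (c x : String) :
    (pre ++ c :: t).set pre.length x = pre ++ x :: t := by
  induction pre with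
  | nil => rfl
  | cons y ys ih => simp only [List.cons_append, List.set_cons_succ, List.length_cons, ih]

theorem stepA_append (pre t : List String) (a b : String) :
    stepA (pre ++ a :: b :: t) pre.length = pre ++ (step a b).1 :: (step a b).2 :: t := by
  have g : ∀ (x y : String) (r : List String), (pre ++ x :: y :: r).getD pre.length "" = x :=
    fun x y r => getD_append_len pre (y :: r) x ""
  have g' : ∀ (x y : String) (r : List String), (pre ++ x :: y :: r).getD (pre.length + 1) "" = y := by
    intro x y r
    have h := getD_append_len (pre ++ [x]) r y ""
    simp only [List.length_append, List.length_cons, List.length_nil, List.append_assoc,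
      List.cons_append, List.nil_append, Nat.zero_add] at h
    exact h
  have st : ∀ (x y z : String) (r : List String), (pre ++ x :: y :: r).set pre.length z = pre ++ z :: y :: r :=
    fun x y z r => set_append_len pre (y :: r) x z
  have st' : ∀ (x y z : String) (r : List String), (pre ++ x :: y :: r).set (pre.length + 1) z = pre ++ x :: z :: r := by
    intro x y z r
    have h := set_append_len (pre ++ [x]) r y z
    simp only [List.length_append, List.length_cons, List.length_nil, List.append_assoc,
      List.cons_append, List.nil_append, Nat.zero_add] at h
    exact h
  by_cases h1 : a = "." ∧ b = "."
  · obtain ⟨rfl, rfl⟩ := h1; simp [stepA, step, st, st']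
  by_cases h2 : a = "." ∧ b = " "
  · obtain ⟨rfl, rfl⟩ := h2; simp [stepA, step, st, st']
  by_cases h3 : a = ":" ∧ b = " "
  · obtain ⟨rfl, rfl⟩ := h3; simp [stepA, step, st, st']
  by_cases h4 : a = ":" ∧ b = "."
  · obtain ⟨rfl, rfl⟩ := h4; simp [stepA, step, st, st']
  · simp [stepA, step, h1, h2, h3, h4]


theorem foldl_stepA_range' (t : List String) : ∀ (a : String) (pre : List String),
    (List.range' pre.length t.length).foldl stepA (pre ++ a :: t) = pre ++ sweepCarry a t := by
  induction t with
  | nil => intro a pre; simp [sweepCarry]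
  | cons b t ih =>
    intro a pre
    simp only [List.length_cons, List.range'_succ, List.foldl_cons]
    rw [stepA_append]
    have h2 := ih (step a b).2 (pre ++ [(step a b).1])
    simp only [List.length_append, List.length_cons, List.length_nil, List.append_assoc,
      List.cons_append, List.nil_append, Nat.zero_add] at h2
    rw [h2]
    rfl


theorem innerA_eq_sweep (l : List String) : innerA l = sweep l := by
  cases l with
  | nil => rfl
  | cons a t =>
    unfold innerA
    have h := foldl_stepA_range' t a []
    simpa [List.range_eq_range', sweep] using h


theorem foldl_range_iterate (f : List String → List String) :
    ∀ (n : Nat) (l : List String), (List.range n).foldl (fun acc _ => f acc) l = f^[n] l := by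
  intro n
  induction n with
  | zero => intro l; rfl
  | succ n ih =>
    intro l
    rw [List.range_succ, List.foldl_append, ih, Function.iterate_succ_apply']
    rfl


theorem portA_eq_iterate (segment : List String) :
    falling_rock_py segment = sweep^[segment.length] segment := by
  unfold falling_rock_py
  rw [foldl_range_iterate innerA segment.length segment,
    funext innerA_eq_sweep]


-- ---- step facts on cells ----
theorem step_cells (a b : String) (ha : isCell a = true) (hb : isCell b = true) :
    isCell (step a b).1 = true ∧ isCell (step a b).2 = true ∧
    units (step a b).1 + units (step a b).2 = units a + units b ∧
    (1 ≤ units (step a b).1 → (step a b).2 = ":") := by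
  simp only [isCell, Bool.or_eq_true, decide_eq_true_eq] at ha hb
  rcases ha with (rfl | rfl) | rfl <;> rcases hb with (rfl | rfl) | rfl <;> decide


theorem step_colon_right (a : String) : step a ":" = (a, ":") := by
  simp [step]


theorem step_barrier_right (a b : String) (h1 : b ≠ ".") (h2 : b ≠ " ") : step a b = (a, b) := by
  simp [step, h1, h2]


theorem step_barrier_left (a b : String) (h1 : a ≠ ".") (h2 : a ≠ ":") : step a b = (a, b) := by
  simp [step, h1, h2]


-- ---- carry-sweep facts on region words ----
theorem unitsL_nil : unitsL [] = 0 := rfl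
theorem unitsL_cons (c : String) (l : List String) : unitsL (c :: l) = units c + unitsL l := by
  simp [unitsL]
theorem cell_zero (c : String) (hc : isCell c = true) (h0 : units c = 0) : c = " " := by
  simp only [isCell, Bool.or_eq_true, decide_eq_true_eq] at hc
  rcases hc with (rfl | rfl) | rfl <;> first | rfl | simp [units] at h0
theorem cell_two (c : String) (hc : isCell c = true) (h2 : 2 ≤ units c) : c = ":" := by
  simp only [isCell, Bool.or_eq_true, decide_eq_true_eq] at hc
  rcases hc with (rfl | rfl) | rfl <;> first | rfl | simp [units] at h2
theorem cell_one (c : String) (hc : isCell c = true) (h1 : units c = 1) : c = "." := by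
  simp only [isCell, Bool.or_eq_true, decide_eq_true_eq] at hc
  rcases hc with (rfl | rfl) | rfl <;> first | rfl | simp [units] at h1

theorem sweepCarry_colon : ∀ (t : List String), (∀ c ∈ t, isCell c = true) →
    ∀ a, isCell a = true → 2 ≤ unitsL (a :: t) →
    ∃ v, sweepCarry a t = v ++ [":"] ∧ v.length = t.length ∧
      (∀ c ∈ v, isCell c = true) ∧ unitsL v + 2 = unitsL (a :: t) := by
  intro t
  induction t with
  | nil =>
    intro _ a ha h2
    rw [unitsL_cons, unitsL_nil] at h2
    have := cell_two a ha (by omega)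
    subst this
    exact ⟨[], rfl, rfl, by simp, by simp [unitsL_cons, unitsL_nil, units]⟩
  | cons b t ih =>
    intro ht a ha h2
    have hb : isCell b = true := ht b (List.mem_cons_self ..)
    have ht' : ∀ c ∈ t, isCell c = true := fun c hc => ht c (List.mem_cons_of_mem _ hc)
    obtain ⟨ca, cb, hcons, hkey⟩ := step_cells a b ha hb
    have hb2 : 2 ≤ unitsL ((step a b).2 :: t) := by
      rw [unitsL_cons]
      rw [unitsL_cons, unitsL_cons] at h2
      rcases Nat.eq_zero_or_pos (units (step a b).1) with h | h
      · omega
      · have hcolon := hkey h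
        rw [hcolon, show units ":" = 2 from rfl]
        omega
    obtain ⟨v, hv, hlen, hcells, hunits⟩ := ih ht' (step a b).2 cb hb2
    refine ⟨(step a b).1 :: v, ?_, ?_, ?_, ?_⟩
    · simp [sweepCarry, hv]
    · simp [hlen]
    · intro c hc
      rcases List.mem_cons.mp hc with rfl | hc
      · exact ca
      · exact hcells c hc
    · rw [unitsL_cons] at hunits ⊢
      rw [unitsL_cons, unitsL_cons]
      omega

theorem sweepCarry_dot : ∀ (t : List String), (∀ c ∈ t, isCell c = true) →
    ∀ a, isCell a = true → unitsL (a :: t) = 1 →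
    sweepCarry a t = List.replicate t.length " " ++ ["."] := by
  intro t
  induction t with
  | nil =>
    intro _ a ha h1
    rw [unitsL_cons, unitsL_nil] at h1
    have := cell_one a ha (by omega)
    subst this
    rfl
  | cons b t ih =>
    intro ht a ha h1
    have hb : isCell b = true := ht b (List.mem_cons_self ..)
    have ht' : ∀ c ∈ t, isCell c = true := fun c hc => ht c (List.mem_cons_of_mem _ hc)
    obtain ⟨ca, cb, hcons, hkey⟩ := step_cells a b ha hb
    have ha0 : units (step a b).1 = 0 := by
      by_contra h
      have hcolon := hkey (by omega)
      rw [unitsL_cons, unitsL_cons] at h1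
      rw [hcolon, show units ":" = 2 from rfl] at hcons
      omega
    have hsp : (step a b).1 = " " := cell_zero _ ca ha0
    have hb1 : unitsL ((step a b).2 :: t) = 1 := by
      rw [unitsL_cons]
      rw [unitsL_cons, unitsL_cons] at h1
      omega
    have := ih ht' (step a b).2 cb hb1
    simp [sweepCarry, this, hsp, List.replicate_succ]

theorem region_zero : ∀ (l : List String), (∀ c ∈ l, isCell c = true) → unitsL l = 0 →
    l = List.replicate l.length " " := by
  intro l
  induction l with
  | nil => intro _ _; rfl
  | cons c l ih =>
    intro hl h0
    rw [unitsL_cons] at h0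
    have hc : c = " " := cell_zero c (hl c (List.mem_cons_self ..)) (by omega)
    have := ih (fun d hd => hl d (List.mem_cons_of_mem _ hd)) (by omega)
    simp [hc, List.replicate_succ, ← this]

-- ---- fixpoints and append lemmas ----
theorem sweepCarry_sp_dot (j : Nat) :
    sweepCarry " " (List.replicate j " " ++ ["."]) = List.replicate (j + 1) " " ++ ["."] := by
  induction j with
  | zero => rfl
  | succ j ih =>
    rw [List.replicate_succ, List.cons_append]
    show (step " " " ").1 :: sweepCarry (step " " " ").2 (List.replicate j " " ++ ["."]) = _
    rw [show step " " " " = (" ", " ") from rfl]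
    simp only [ih, List.replicate_succ, List.cons_append]

theorem sweep_spaces_dot (j : Nat) :
    sweep (List.replicate j " " ++ ["."]) = List.replicate j " " ++ ["."] := by
  cases j with
  | zero => rfl
  | succ j =>
    rw [List.replicate_succ, List.cons_append]
    show sweepCarry " " (List.replicate j " " ++ ["."]) = _
    rw [sweepCarry_sp_dot, List.replicate_succ, List.cons_append]

theorem sweepCarry_sp (j : Nat) :
    sweepCarry " " (List.replicate j " ") = List.replicate (j + 1) " " := by
  induction j with
  | zero => rfl
  | succ j ih =>
    rw [List.replicate_succ]
    show (step " " " ").1 :: sweepCarry (step " " " ").2 (List.replicate j " ") = _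
    rw [show step " " " " = (" ", " ") from rfl]
    simp only [ih, List.replicate_succ]

theorem sweep_spaces (m : Nat) : sweep (List.replicate m " ") = List.replicate m " " := by
  cases m with
  | zero => rfl
  | succ m =>
    rw [List.replicate_succ]
    show sweepCarry " " (List.replicate m " ") = _
    rw [sweepCarry_sp, List.replicate_succ]


theorem sweepCarry_append_colon : ∀ (t : List String) (a : String),
    sweepCarry a (t ++ [":"]) = sweepCarry a t ++ [":"] := by
  intro t
  induction t with
  | nil => intro a; simp [sweepCarry, step_colon_right]
  | cons b t ih => intro a; simp [sweepCarry, ih]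

theorem sweep_append_colon (v : List String) : sweep (v ++ [":"]) = sweep v ++ [":"] := by
  cases v with
  | nil => rfl
  | cons a t =>
    rw [List.cons_append]
    show sweepCarry a (t ++ [":"]) = sweepCarry a t ++ [":"]
    exact sweepCarry_append_colon t a


theorem iterate_sweep_append_colon : ∀ (k : Nat) (v : List String),
    sweep^[k] (v ++ [":"]) = sweep^[k] v ++ [":"] := by
  intro k
  induction k with
  | zero => intro v; rfl
  | succ k ih =>
    intro v
    rw [Function.iterate_succ_apply, Function.iterate_succ_apply, sweep_append_colon, ih]


theorem sweepCarry_barrier (x : String) (hx1 : x ≠ ".") (hx3 : x ≠ ":") :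
    ∀ (t : List String), sweepCarry x t = x :: sweep t := by
  intro t
  cases t with
  | nil => rfl
  | cons h t2 =>
    show (step x h).1 :: sweepCarry (step x h).2 t2 = _
    rw [step_barrier_left x h hx1 hx3]
    rfl

theorem sweepCarry_barrier_decomp (x : String) (hx1 : x ≠ ".") (hx2 : x ≠ " ") (hx3 : x ≠ ":")
    (t : List String) : ∀ (R : List String) (a : String),
    sweepCarry a (R ++ x :: t) = sweepCarry a R ++ x :: sweep t := by
  intro R
  induction R with
  | nil =>
    intro a
    show (step a x).1 :: sweepCarry (step a x).2 t = _
    rw [step_barrier_right a x hx1 hx2]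
    simp [sweepCarry_barrier x hx1 hx3 t, sweepCarry]
  | cons b R ih =>
    intro a
    simp [sweepCarry, ih]

theorem sweep_barrier_decomp (R t : List String) (x : String) (hx : isCell x = false) :
    sweep (R ++ x :: t) = sweep R ++ x :: sweep t := by
  obtain ⟨⟨hx2, hx1⟩, hx3⟩ : (¬x = " " ∧ ¬x = ".") ∧ ¬x = ":" := by
    simpa [isCell, not_or] using hx
  cases R with
  | nil => simpa [sweep] using sweepCarry_barrier x hx1 hx3 t
  | cons a R' =>
    rw [List.cons_append]
    show sweepCarry a (R' ++ x :: t) = sweepCarry a R' ++ x :: sweep t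
    exact sweepCarry_barrier_decomp x hx1 hx2 hx3 t R' a


theorem iterate_sweep_barrier_decomp (x : String) (hx : isCell x = false) :
    ∀ (k : Nat) (R t : List String),
    sweep^[k] (R ++ x :: t) = sweep^[k] R ++ x :: sweep^[k] t := by
  intro k
  induction k with
  | zero => intro R t; rfl
  | succ k ih =>
    intro R t
    rw [Function.iterate_succ_apply, Function.iterate_succ_apply, Function.iterate_succ_apply,
      sweep_barrier_decomp R t x hx, ih]


-- ---- port B characterisation ----
theorem altStep_accum : ∀ (R : List String), (∀ c ∈ R, isCell c = true) →
    ∀ (o : List String) (w u : Nat),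
    R.foldl altStep (o, w, u) = (o, w + R.length, u + unitsL R) := by
  intro R
  induction R with
  | nil => intro _ o w u; simp [unitsL_nil]
  | cons c R ih =>
    intro hR o w u
    have hc : isCell c = true := hR c (List.mem_cons_self ..)
    have hR' : ∀ d ∈ R, isCell d = true := fun d hd => hR d (List.mem_cons_of_mem _ hd)
    simp only [isCell, Bool.or_eq_true, decide_eq_true_eq] at hc
    rcases hc with (rfl | rfl) | rfl <;>
      simp only [List.foldl_cons, altStep, reduceIte] <;>
      rw [ih hR'] <;>
      simp [unitsL_cons, units, Prod.ext_iff] <;> omega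


theorem altStep_prefix : ∀ (t : List String) (o : List String) (w u : Nat),
    t.foldl altStep (o, w, u) =
      ((o ++ (t.foldl altStep ([], w, u)).1), (t.foldl altStep ([], w, u)).2) := by
  intro t
  induction t with
  | nil => intro o w u; simp
  | cons c t ih =>
    intro o w u
    by_cases h1 : c = "."
    · subst h1; simp only [List.foldl_cons, altStep, reduceIte]; exact ih o (w+1) (u+1)
    by_cases h2 : c = ":"
    · subst h2; simp only [List.foldl_cons, altStep, reduceIte, if_neg h1]
      exact ih o (w+1) (u+2)
    by_cases h3 : c = " "
    · subst h3; simp only [List.foldl_cons, altStep, reduceIte, if_neg h1, if_neg h2]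
      exact ih o (w+1) u
    · simp only [List.foldl_cons, altStep, if_neg h1, if_neg h2, if_neg h3]
      rw [ih (o ++ packedCells w u ++ [c]) 0 0, ih ([] ++ packedCells w u ++ [c]) 0 0]
      simp [List.append_assoc]


theorem alt_region (R : List String) (hR : ∀ c ∈ R, isCell c = true) :
    falling_rock_py_alt R = packedCells R.length (unitsL R) := by
  unfold falling_rock_py_alt
  rw [altStep_accum R hR [] 0 0]
  simp


theorem alt_decomp (R t : List String) (x : String) (hR : ∀ c ∈ R, isCell c = true)
    (hx : isCell x = false) :
    falling_rock_py_alt (R ++ x :: t) =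
      packedCells R.length (unitsL R) ++ x :: falling_rock_py_alt t := by
  obtain ⟨⟨hx2, hx1⟩, hx3⟩ : (¬x = " " ∧ ¬x = ".") ∧ ¬x = ":" := by
    simpa [isCell, not_or] using hx
  unfold falling_rock_py_alt
  rw [List.foldl_append, altStep_accum R hR [] 0 0, List.foldl_cons]
  simp only [altStep, if_neg hx1, if_neg hx3, if_neg hx2]
  rw [altStep_prefix t ([] ++ packedCells (0 + R.length) (0 + unitsL R) ++ [x]) 0 0]
  simp [List.append_assoc]


theorem packedCells_zero (m : Nat) : packedCells m 0 = List.replicate m " " := by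
  simp [packedCells]


theorem packedCells_one (m : Nat) : packedCells (m + 1) 1 = List.replicate m " " ++ ["."] := by
  simp [packedCells]


theorem packedCells_colon (m u : Nat) (hu : 2 ≤ u) :
    packedCells (m + 1) u = packedCells m (u - 2) ++ [":"] := by
  unfold packedCells
  have hdiv : u / 2 = (u - 2) / 2 + 1 := by omega
  have hmod : u % 2 = (u - 2) % 2 := by omega
  rw [hdiv, hmod, List.replicate_succ']
  by_cases h : (u - 2) % 2 = 1 <;>
    simp [h, List.append_assoc, List.length_append, Nat.succ_sub_succ]


-- ---- settling a single region ----
theorem settle_region : ∀ (m : Nat) (w : List String), (∀ c ∈ w, isCell c = true) →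
    w.length = m → ∀ k, m ≤ k → sweep^[k] w = falling_rock_py_alt w := by
  intro m
  induction m with
  | zero =>
    intro w _ hlen k _
    have hw : w = [] := List.eq_nil_of_length_eq_zero hlen
    subst hw
    rw [Function.iterate_fixed (show sweep [] = [] from rfl) k]
    rfl
  | succ m ih =>
    intro w hw hlen k hk
    obtain ⟨a, t, rfl⟩ : ∃ a t, w = a :: t := by
      cases w with
      | nil => simp at hlen
      | cons a t => exact ⟨a, t, rfl⟩
    have hlt : t.length = m := by simpa using hlen
    have ha : isCell a = true := hw a (List.mem_cons_self ..)
    have ht' : ∀ c ∈ t, isCell c = true := fun c hc => hw c (List.mem_cons_of_mem _ hc)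
    by_cases h2 : 2 ≤ unitsL (a :: t)
    · obtain ⟨k', rfl⟩ : ∃ k', k = k' + 1 := ⟨k - 1, by omega⟩
      obtain ⟨v, hv, hlenv, hcv, huv⟩ := sweepCarry_colon t ht' a ha h2
      rw [Function.iterate_succ_apply, show sweep (a :: t) = v ++ [":"] from hv,
        iterate_sweep_append_colon k' v, ih v hcv (hlenv.trans hlt) k' (by omega),
        alt_region v hcv, alt_region (a :: t) hw, hlenv, hlt, hlen,
        packedCells_colon m (unitsL (a :: t)) h2]
      have hv2 : unitsL v = unitsL (a :: t) - 2 := by omega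
      rw [hv2]
    by_cases h1 : unitsL (a :: t) = 1
    · obtain ⟨k', rfl⟩ : ∃ k', k = k' + 1 := ⟨k - 1, by omega⟩
      rw [Function.iterate_succ_apply,
        show sweep (a :: t) = List.replicate t.length " " ++ ["."] from sweepCarry_dot t ht' a ha h1,
        Function.iterate_fixed (sweep_spaces_dot t.length) k',
        alt_region (a :: t) hw, hlen, h1, packedCells_one, hlt]
    · have h0 : unitsL (a :: t) = 0 := by omega
      have hrep := region_zero (a :: t) hw h0
      calc sweep^[k] (a :: t) = a :: t := by
            rw [hrep, Function.iterate_fixed (sweep_spaces _) k]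
        _ = falling_rock_py_alt (a :: t) := by
            rw [alt_region (a :: t) hw, h0, packedCells_zero]
            exact hrep

-- ---- main theorem ----
theorem dropWhile_head_false {p : String → Bool} : ∀ (l : List String) (x : String)
    (t : List String), l.dropWhile p = x :: t → p x = false := by
  intro l
  induction l with
  | nil => intro x t h; simp [List.dropWhile] at h
  | cons a l ih =>
    intro x t h
    rw [List.dropWhile_cons] at h
    by_cases hp : p a = true
    · rw [if_pos hp] at h; exact ih x t h
    · rw [if_neg hp] at h
      obtain ⟨rfl, -⟩ := List.cons.inj h
      simpa using hp

theorem settle : ∀ (n : Nat) (l : List String), l.length = n →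
    ∀ k, n ≤ k → sweep^[k] l = falling_rock_py_alt l := by
  intro n
  induction n using Nat.strong_induction_on with
  | _ n ih =>
    intro l hlen k hk
    have hsplit : List.takeWhile isCell l ++ List.dropWhile isCell l = l :=
      List.takeWhile_append_dropWhile
    have hRcells : ∀ c ∈ List.takeWhile isCell l, isCell c = true :=
      fun c hc => List.mem_takeWhile_imp hc
    cases hd : List.dropWhile isCell l with
    | nil =>
      have hTake : List.takeWhile isCell l = l := by
        conv_rhs => rw [← hsplit, hd, List.append_nil]
      have hcl : ∀ c ∈ l, isCell c = true := fun c hc => hRcells c (by rw [hTake]; exact hc)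
      exact settle_region n l hcl hlen k hk
    | cons x t =>
      have hx : isCell x = false := dropWhile_head_false l x t hd
      obtain ⟨R, hRc, hRl⟩ : ∃ R, (∀ c ∈ R, isCell c = true) ∧ l = R ++ x :: t :=
        ⟨List.takeWhile isCell l, hRcells, by conv_lhs => rw [← hsplit, hd]⟩
      subst hRl
      have hlens : R.length + (t.length + 1) = n := by simpa using hlen
      rw [iterate_sweep_barrier_decomp x hx k,
        settle_region R.length R hRc rfl k (by omega),
        ih t.length (by omega) t rfl k (by omega),
        alt_decomp R t x hRc hx, alt_region R hRc]

-- ===== VERDICT (by name: the statement is the Claim_ definition above) =====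
theorem falling_rock_py_spec : Claim_equal_falling_rock_py := by
  intro segment _
  unfold Spec_falling_rock_py
  rw [portA_eq_iterate]
  exact settle segment.length segment rfl segment.length le_rfl
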